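-- pv_equiv track=rewrite | github.com/justinhwang24/persuasive-argument-prediction | scripts/gpt_eval_pairs.py | extract_choice
-- ===== SOURCE A (Python) =====
-- def extract_choice(response_text):
--     response_text = response_text.strip().upper()
--     if "A" in response_text and not "B" in response_text[:response_text.find("A")]:
--         return "A"
--     if "B" in response_text and not "A" in response_text[:response_text.find("B")]:
--         return "B"
--     for line in response_text.splitlines():
--         if line.strip().startswith(("A", "B")):
--             return line.strip()[0]
--     return "UNKNOWN"
-- ===== SOURCE B (Python) =====
-- def extract_choice(response_text):
--     for c in response_text.strip().upper():
--         if c == 'A':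
--             return 'A'
--         if c == 'B':
--             return 'B'
--     return 'UNKNOWN'
-- ===== Notes on version B (the rewrite author's own statement) =====
-- stated objective: simpler
-- what changed: Replaced the two membership-plus-prefix-slice tests and the unreachable splitlines fallback by a single left-to-right character scan that stops at the first occurrence of either letter.
import Mathlib
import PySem

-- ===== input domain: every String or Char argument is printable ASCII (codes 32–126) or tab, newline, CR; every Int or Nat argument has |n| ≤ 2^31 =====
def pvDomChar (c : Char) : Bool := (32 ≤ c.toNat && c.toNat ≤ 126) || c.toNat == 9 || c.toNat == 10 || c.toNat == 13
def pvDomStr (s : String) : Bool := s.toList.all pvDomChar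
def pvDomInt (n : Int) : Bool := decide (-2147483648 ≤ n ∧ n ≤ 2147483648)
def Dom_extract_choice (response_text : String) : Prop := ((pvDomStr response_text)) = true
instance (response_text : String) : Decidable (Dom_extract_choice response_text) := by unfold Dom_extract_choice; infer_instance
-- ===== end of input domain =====

-- B replaces A's membership-plus-prefix-slice tests and unreachable splitlines fallback
-- by a single left-to-right scan that stops at the first occurrence of either letter (objective: simpler).


-- ===== PORT A =====
-- the 'for line in response_text.splitlines(): …' fallback loop of A
def extract_choice_loop : List (List Char) → String
  | [] => "UNKNOWN"
  | line :: rest =>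
    let t := PySem.Chars.strip line
    if PySem.Chars.startswith t ['A'] || PySem.Chars.startswith t ['B'] then
      -- line.strip()[0]; the 'none' arm is Python's IndexError, unreachable under the startswith guard
      match PySem.List.pyGet? t (0 : Int) with
      | some c => String.ofList [c]
      | none => "UNKNOWN"
    else extract_choice_loop rest

def extract_choice (response_text : String) : String :=
  let s := PySem.Chars.upper (PySem.Chars.strip response_text.toList)
  if PySem.Chars.isIn ['A'] s &&
      !(PySem.Chars.isIn ['B'] (PySem.Chars.slice s none (some (PySem.Chars.find s ['A'])))) then "A"
  else if PySem.Chars.isIn ['B'] s &&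
      !(PySem.Chars.isIn ['A'] (PySem.Chars.slice s none (some (PySem.Chars.find s ['B'])))) then "B"
  else extract_choice_loop (PySem.Chars.splitlines s)

-- ===== PORT B =====
-- 'for c in response_text.strip().upper(): …'
def extract_choice_scan : List Char → String
  | [] => "UNKNOWN"
  | c :: rest => if c = 'A' then "A" else if c = 'B' then "B" else extract_choice_scan rest

def extract_choice_alt (response_text : String) : String :=
  extract_choice_scan (PySem.Chars.upper (PySem.Chars.strip response_text.toList))

-- ===== PRECONDITION & SPEC =====
def Spec_extract_choice (response_text : String) (out : String) : Prop := out = extract_choice_alt response_text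
instance (response_text : String) (out : String) : Decidable (Spec_extract_choice response_text out) := by unfold Spec_extract_choice; infer_instance

-- ===== CLAIM (what is proved, stated in full; the proofs are below) =====
def Claim_equal_extract_choice : Prop := ∀ (response_text : String), Dom_extract_choice response_text → Spec_extract_choice response_text (extract_choice response_text)

-- ===== LEMMAS AND PROOFS =====

theorem pv_singleton_prefix_iff (c : Char) (xs : List Char) : [c] <+: xs ↔ xs.head? = some c := by
  cases xs <;> simp [List.cons_prefix_cons, eq_comm]

theorem pv_isIn_single (c : Char) (l : List Char) : PySem.Chars.isIn [c] l = true ↔ c ∈ l := by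
  rw [PySem.Chars.isIn_iff_infix, List.singleton_infix_iff]

theorem pv_idxOf_le (c : Char) (l : List Char) (i : Nat) (hi : i < l.length) (he : l[i] = c) :
    l.idxOf c ≤ i := by
  by_contra h
  rw [not_le] at h
  have := List.not_of_lt_findIdx (p := (· == c)) (xs := l) (i := i) h
  simp at this
  exact this he

theorem pv_mem_take_idxOf_lt (c : Char) (l : List Char) (n : Nat) (h : c ∈ l.take n) :
    l.idxOf c < n := by
  rcases List.mem_iff_getElem.1 h with ⟨i, hi, he⟩
  have hil : i < l.length := by simp at hi; omega
  have hin : i < n := by simp at hi; omega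
  have := pv_idxOf_le c l i hil (by rw [← List.getElem_take (h := hi)]; exact he)
  omega

theorem pv_find_single (c : Char) (l : List Char) (h : c ∈ l) :
    PySem.Chars.find l [c] = (l.idxOf c : Int) := by
  have hnn : 0 ≤ PySem.Chars.find l [c] :=
    (PySem.Chars.find_nonneg_iff l [c]).2 ((List.singleton_infix_iff c l).2 h)
  obtain ⟨hpre, hmin⟩ := PySem.Chars.find_spec (s := l) (sub := [c]) hnn
  set k := (PySem.Chars.find l [c]).toNat with hk
  have hgk : l[k]? = some c := by
    rw [← List.head?_drop]
    exact ((pv_singleton_prefix_iff c _).1 hpre)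
  have hkl : k < l.length := by
    rcases List.getElem?_eq_some_iff.1 hgk with ⟨hh, _⟩
    exact hh
  have hge : l[k] = c := by
    rw [List.getElem?_eq_getElem hkl] at hgk
    exact Option.some.inj hgk
  have hidx : l.idxOf c = k := by
    apply (List.findIdx_eq (p := (· == c)) hkl).2
    refine ⟨by simp [hge], ?_⟩
    intro j hj
    have hnp : ¬ [c] <+: l.drop j := hmin j hj
    rw [pv_singleton_prefix_iff, List.head?_drop] at hnp
    have hjl : j < l.length := by omega
    rw [List.getElem?_eq_getElem hjl] at hnp
    simpa using fun hq => hnp (by rw [hq])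
  omega

theorem pv_cond_iff (x y : Char) (l : List Char) :
    (PySem.Chars.isIn [x] l &&
      !(PySem.Chars.isIn [y] (PySem.Chars.slice l none (some (PySem.Chars.find l [x]))))) = true
    ↔ (x ∈ l ∧ y ∉ l.take (l.idxOf x)) := by
  by_cases hx : x ∈ l
  · rw [pv_find_single x l hx]
    have hsl : PySem.Chars.slice l none (some (l.idxOf x : Int)) = l.take (l.idxOf x) := by
      rw [PySem.Chars.slice_eq_listSlice, PySem.List.slice_to_natCast]
    rw [hsl]
    constructor
    · intro hcnd
      rw [Bool.and_eq_true] at hcnd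
      obtain ⟨-, hb⟩ := hcnd
      rw [Bool.not_eq_true', PySem.Chars.isIn_eq_false_iff] at hb
      exact ⟨hx, fun hm => hb ((List.singleton_infix_iff y _).2 hm)⟩
    · rintro ⟨-, hb⟩
      rw [Bool.and_eq_true]
      refine ⟨(pv_isIn_single x l).2 hx, ?_⟩
      rw [Bool.not_eq_true', PySem.Chars.isIn_eq_false_iff]
      exact fun hin => hb ((List.singleton_infix_iff y _).1 hin)
  · constructor
    · intro h
      rw [Bool.and_eq_true, pv_isIn_single] at h
      exact absurd h.1 hx
    · rintro ⟨h, -⟩; exact absurd h hx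

-- B's scan, characterised by the two "first of A/B" conditions
theorem pv_scan_char (cs : List Char) :
    extract_choice_scan cs =
      (if 'A' ∈ cs ∧ 'B' ∉ cs.take (cs.idxOf 'A') then "A"
       else if 'B' ∈ cs ∧ 'A' ∉ cs.take (cs.idxOf 'B') then "B"
       else "UNKNOWN") := by
  induction cs with
  | nil => simp [extract_choice_scan]
  | cons c rest ih =>
    by_cases hA : c = 'A'
    · subst hA
      simp [extract_choice_scan, List.idxOf_cons_self]
    · by_cases hB : c = 'B'
      · subst hB
        have h1 : ¬('A' ∈ 'B' :: rest ∧ 'B' ∉ ('B' :: rest).take (List.idxOf 'A' ('B' :: rest))) := by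
          rintro ⟨hm, hnt⟩
          rw [List.idxOf_cons_ne _ (by decide)] at hnt
          simp [List.take_succ_cons] at hnt
        have h2 : 'B' ∈ 'B' :: rest ∧ 'A' ∉ ('B' :: rest).take (List.idxOf 'B' ('B' :: rest)) := by
          refine ⟨by simp, ?_⟩
          rw [List.idxOf_cons_self]
          simp
        rw [if_neg h1, if_pos h2]
        simp [extract_choice_scan]
      · have hA' : ¬('A' = c) := fun h => hA h.symm
        have hB' : ¬('B' = c) := fun h => hB h.symm
        have e1 : ('A' ∈ c :: rest ∧ 'B' ∉ (c :: rest).take (List.idxOf 'A' (c :: rest))) ↔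
            ('A' ∈ rest ∧ 'B' ∉ rest.take (List.idxOf 'A' rest)) := by
          rw [List.idxOf_cons_ne _ (fun h => hA h)]
          simp [List.take_succ_cons, hA', hB']
        have e2 : ('B' ∈ c :: rest ∧ 'A' ∉ (c :: rest).take (List.idxOf 'B' (c :: rest))) ↔
            ('B' ∈ rest ∧ 'A' ∉ rest.take (List.idxOf 'B' rest)) := by
          rw [List.idxOf_cons_ne _ (fun h => hB h)]
          simp [List.take_succ_cons, hA', hB']
        calc extract_choice_scan (c :: rest)
            = extract_choice_scan rest := by simp [extract_choice_scan, hA, hB]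
          _ = _ := by rw [ih]; exact (if_congr e1 rfl (if_congr e2 rfl rfl)).symm

-- chars of a stripped line are chars of the line
theorem pv_mem_strip (c : Char) (l : List Char) (h : c ∈ PySem.Chars.strip l) : c ∈ l := by
  simp only [PySem.Chars.strip, PySem.Chars.rstrip, PySem.Chars.lstrip] at h
  rw [List.mem_reverse] at h
  have h1 := (List.dropWhile_sublist (l := (l.dropWhile PySem.Chars.isspace).reverse)
      (p := PySem.Chars.isspace)).mem h
  rw [List.mem_reverse] at h1
  exact (List.dropWhile_sublist (l := l) (p := PySem.Chars.isspace)).mem h1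

-- every char of every line produced by splitlines.go comes from s, cur or acc
theorem pv_splitlines_mem (isB : Char → Bool) (s cur : List Char) (acc : List (List Char))
    (P : Char → Prop)
    (ha : ∀ l ∈ acc, ∀ c ∈ l, P c) (hc : ∀ c ∈ cur, P c) (hs : ∀ c ∈ s, P c) :
    ∀ l ∈ PySem.Chars.splitlines.go isB s cur acc, ∀ c ∈ l, P c := by
  fun_induction PySem.Chars.splitlines.go isB s cur acc with
  | case1 cur acc hcur =>
    intro l hl
    exact ha l (List.mem_reverse.1 hl)
  | case2 cur acc hcur =>
    intro l hl
    rw [List.mem_reverse] at hl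
    rcases List.mem_cons.1 hl with h | h
    · subst h; intro c hcm; exact hc c (List.mem_reverse.1 hcm)
    · exact ha l h
  | case3 rest cur acc ih =>
    refine ih ?_ (by simp) (fun c hcm => hs c (by simp [hcm]))
    intro l hl
    rcases List.mem_cons.1 hl with h | h
    · subst h; intro c hcm; exact hc c (List.mem_reverse.1 hcm)
    · exact ha l h
  | case4 c rest cur acc hne hb ih =>
    refine ih ?_ (by simp) (fun d hd => hs d (by simp [hd]))
    intro l hl
    rcases List.mem_cons.1 hl with h | h
    · subst h; intro d hd; exact hc d (List.mem_reverse.1 hd)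
    · exact ha l h
  | case5 c rest cur acc hne hb ih =>
    refine ih ha ?_ (fun d hd => hs d (by simp [hd]))
    intro d hd
    rcases List.mem_cons.1 hd with h | h
    · subst h; exact hs d (by simp)
    · exact hc d h

-- A's fallback loop returns UNKNOWN when no line contains 'A' or 'B'
theorem pv_loop_unknown (lines : List (List Char))
    (h : ∀ l ∈ lines, ∀ c ∈ l, c ≠ 'A' ∧ c ≠ 'B') :
    extract_choice_loop lines = "UNKNOWN" := by
  induction lines with
  | nil => rfl
  | cons line rest ih =>
    have hstart : ∀ x : Char, PySem.Chars.startswith (PySem.Chars.strip line) [x] = true →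
        x ∈ line := by
      intro x hp
      have hh := (pv_singleton_prefix_iff x _).1 ((PySem.Chars.startswith_iff _ _).1 hp)
      exact pv_mem_strip x line (List.mem_of_mem_head? (by rw [hh]; simp))
    have hA : PySem.Chars.startswith (PySem.Chars.strip line) ['A'] = false := by
      rw [Bool.eq_false_iff]
      exact fun hp => (h line (by simp) 'A' (hstart 'A' hp)).1 rfl
    have hB : PySem.Chars.startswith (PySem.Chars.strip line) ['B'] = false := by
      rw [Bool.eq_false_iff]
      exact fun hp => (h line (by simp) 'B' (hstart 'B' hp)).2 rfl
    simp only [extract_choice_loop, hA, hB, Bool.or_self]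
    exact ih (fun l hl => h l (by simp [hl]))

-- both of A's conditions false ⇒ neither letter occurs at all
theorem pv_neither (l : List Char)
    (h1 : ¬('A' ∈ l ∧ 'B' ∉ l.take (l.idxOf 'A')))
    (h2 : ¬('B' ∈ l ∧ 'A' ∉ l.take (l.idxOf 'B'))) :
    'A' ∉ l ∧ 'B' ∉ l := by
  have key : 'A' ∉ l := by
    intro hA
    have hB : 'B' ∈ l.take (l.idxOf 'A') := by
      by_contra hnb; exact h1 ⟨hA, hnb⟩
    have hBl : 'B' ∈ l := List.mem_of_mem_take hB
    have hlt : l.idxOf 'B' < l.idxOf 'A' := pv_mem_take_idxOf_lt 'B' l _ hB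
    have hA2 : 'A' ∈ l.take (l.idxOf 'B') := by
      by_contra hna; exact h2 ⟨hBl, hna⟩
    have := pv_mem_take_idxOf_lt 'A' l _ hA2
    omega
  refine ⟨key, ?_⟩
  intro hB
  have hA2 : 'A' ∈ l.take (l.idxOf 'B') := by
    by_contra hna; exact h2 ⟨hB, hna⟩
  exact key (List.mem_of_mem_take hA2)

theorem pv_scan_unknown (cs : List Char) (hA : 'A' ∉ cs) (hB : 'B' ∉ cs) :
    extract_choice_scan cs = "UNKNOWN" := by
  rw [pv_scan_char]
  simp [hA, hB]

-- ===== VERDICT (by name: the statement is the Claim_ definition above) =====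
theorem extract_choice_spec : Claim_equal_extract_choice := by
  intro rt _
  unfold Spec_extract_choice extract_choice extract_choice_alt
  set cs := PySem.Chars.upper (PySem.Chars.strip rt.toList) with hcs
  by_cases c1 : 'A' ∈ cs ∧ 'B' ∉ cs.take (cs.idxOf 'A')
  · rw [if_pos ((pv_cond_iff 'A' 'B' cs).2 c1), pv_scan_char, if_pos c1]
  · rw [if_neg (fun hb => c1 ((pv_cond_iff 'A' 'B' cs).1 hb))]
    by_cases c2 : 'B' ∈ cs ∧ 'A' ∉ cs.take (cs.idxOf 'B')
    · rw [if_pos ((pv_cond_iff 'B' 'A' cs).2 c2), pv_scan_char, if_neg c1, if_pos c2]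
    · rw [if_neg (fun hb => c2 ((pv_cond_iff 'B' 'A' cs).1 hb))]
      obtain ⟨hA, hB⟩ := pv_neither cs c1 c2
      rw [pv_scan_unknown cs hA hB]
      unfold PySem.Chars.splitlines
      apply pv_loop_unknown
      intro l hl c hc
      have hmem := pv_splitlines_mem _ cs [] [] (fun c => c ∈ cs)
        (by simp) (by simp) (fun c h => h) l hl c hc
      exact ⟨fun h => hA (h ▸ hmem), fun h => hB (h ▸ hmem)⟩
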